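-- pv_equiv track=rewrite | github.com/anncy0413/SeniorProject-HETA-Lite | heta_batch_runner.py | _build_content_indices
-- ===== SOURCE A (Python) =====
-- from typing import Any, Dict, List, Tuple
--
-- def _build_content_indices(
--     segment_ranges: Dict[str, Tuple[int, int]], prompt_len: int, context_len: int
-- ) -> List[int]:
--     indices: List[int] = []
--     for start, end in segment_ranges.values():
--         lo = max(0, int(start))
--         hi = min(context_len, int(end))
--         if hi > lo:
--             indices.extend(range(lo, hi))
--     if context_len > prompt_len:
--         indices.extend(range(prompt_len, context_len))
--     return sorted(set(indices))
-- ===== SOURCE B (Python) =====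
-- def _build_content_indices(segment_ranges, prompt_len, context_len):
--     # Collect clamped non-empty intervals, sort by start, merge overlaps,
--     # and emit each merged interval's indices once (already sorted, no dedup pass).
--     ivs = []
--     for start, end in segment_ranges.values():
--         lo = max(0, int(start))
--         hi = min(context_len, int(end))
--         if hi > lo:
--             ivs.append((lo, hi))
--     if context_len > prompt_len:
--         ivs.append((prompt_len, context_len))
--     ivs.sort(key=lambda p: p[0])
--     out = []
--     cur = None
--     for lo, hi in ivs:
--         if cur is None:
--             cur = (lo, hi)
--         elif lo <= cur[1]:
--             cur = (cur[0], max(cur[1], hi))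
--         else:
--             out.extend(range(cur[0], cur[1]))
--             cur = (lo, hi)
--     if cur is not None:
--         out.extend(range(cur[0], cur[1]))
--     return out
-- ===== Notes on version B (the rewrite author's own statement) =====
-- stated objective: alternative
-- what changed: Instead of materialising every index of every interval and then sorted(set(...)), B collects the clamped intervals, sorts them by start, merges overlapping ones in one pass and emits each merged interval's indices exactly once.
import Mathlib
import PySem

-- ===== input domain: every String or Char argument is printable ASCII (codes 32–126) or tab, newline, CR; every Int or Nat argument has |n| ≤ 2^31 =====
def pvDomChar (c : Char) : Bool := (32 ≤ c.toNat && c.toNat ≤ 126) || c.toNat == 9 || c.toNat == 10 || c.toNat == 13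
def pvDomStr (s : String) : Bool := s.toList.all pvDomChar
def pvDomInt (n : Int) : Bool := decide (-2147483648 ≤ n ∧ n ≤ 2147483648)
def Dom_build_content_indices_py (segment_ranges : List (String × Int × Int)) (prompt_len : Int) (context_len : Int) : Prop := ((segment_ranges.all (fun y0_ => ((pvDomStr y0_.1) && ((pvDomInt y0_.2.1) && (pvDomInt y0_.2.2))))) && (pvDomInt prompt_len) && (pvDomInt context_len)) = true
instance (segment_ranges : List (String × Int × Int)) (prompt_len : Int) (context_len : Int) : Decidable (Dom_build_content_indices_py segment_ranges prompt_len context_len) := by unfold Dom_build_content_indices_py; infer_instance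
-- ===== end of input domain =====

-- B replaces "materialise every index of every interval, then sorted(set(...))" by
-- "sort the clamped intervals by start, merge overlaps, emit each index once" (alternative algorithm, same measured cost).

-- ===== PORT A =====
def build_content_indices_py (segment_ranges : List (String × Int × Int)) (prompt_len : Int) (context_len : Int) : List Int :=
  let indices := segment_ranges.foldl (fun acc p =>
      let lo := max 0 p.2.1
      let hi := min context_len p.2.2
      if hi > lo then acc ++ PySem.List.pyRange lo hi 1 else acc) []
  let indices2 := if context_len > prompt_len then indices ++ PySem.List.pyRange prompt_len context_len 1 else indices
  PySem.List.sorted (PySem.Set.ofList indices2) (fun x => x) false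

-- ===== PORT B =====
-- one merge step of Source B's loop: state = (out, cur)
def pvStepB (st : List Int × Option (Int × Int)) (p : Int × Int) : List Int × Option (Int × Int) :=
  match st.2 with
  | none => (st.1, some p)
  | some c =>
    if p.1 ≤ c.2 then (st.1, some (c.1, max c.2 p.2))
    else (st.1 ++ PySem.List.pyRange c.1 c.2 1, some p)

-- Source B's final "if cur is not None: out.extend(range(*cur))"
def pvFinB (st : List Int × Option (Int × Int)) : List Int :=
  match st.2 with
  | none => st.1
  | some c => st.1 ++ PySem.List.pyRange c.1 c.2 1

def build_content_indices_py_alt (segment_ranges : List (String × Int × Int)) (prompt_len : Int) (context_len : Int) : List Int :=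
  let ivs := segment_ranges.foldl (fun acc p =>
      let lo := max 0 p.2.1
      let hi := min context_len p.2.2
      if hi > lo then acc ++ [(lo, hi)] else acc) ([] : List (Int × Int))
  let ivs2 := if context_len > prompt_len then ivs ++ [(prompt_len, context_len)] else ivs
  let sivs := PySem.List.sorted ivs2 (fun p => p.1) false
  pvFinB (sivs.foldl pvStepB ([], none))

-- ===== PRECONDITION & SPEC =====
def Spec_build_content_indices_py (segment_ranges : List (String × Int × Int)) (prompt_len : Int) (context_len : Int) (out : List Int) : Prop := out = build_content_indices_py_alt segment_ranges prompt_len context_len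
instance (segment_ranges : List (String × Int × Int)) (prompt_len : Int) (context_len : Int) (out : List Int) : Decidable (Spec_build_content_indices_py segment_ranges prompt_len context_len out) := by unfold Spec_build_content_indices_py; infer_instance

-- ===== CLAIM (what is proved, stated in full; the proofs are below) =====
def Claim_equal_build_content_indices_py : Prop := ∀ (segment_ranges : List (String × Int × Int)) (prompt_len : Int) (context_len : Int), Dom_build_content_indices_py segment_ranges prompt_len context_len → Spec_build_content_indices_py segment_ranges prompt_len context_len (build_content_indices_py segment_ranges prompt_len context_len)

-- ===== LEMMAS AND PROOFS =====

-- recursion view of Source B's merge loop: current interval [lo, hi) against remaining intervals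
def pvMerge : Int → Int → List (Int × Int) → List Int
  | lo, hi, [] => PySem.List.pyRange lo hi 1
  | lo, hi, q :: t =>
    if q.1 ≤ hi then pvMerge lo (max hi q.2) t
    else PySem.List.pyRange lo hi 1 ++ pvMerge q.1 q.2 t

theorem pvFinB_foldl (t : List (Int × Int)) : ∀ (out : List Int) (lo hi : Int),
    pvFinB (t.foldl pvStepB (out, some (lo, hi))) = out ++ pvMerge lo hi t := by
  induction t with
  | nil => intro out lo hi; simp [pvFinB, pvMerge]
  | cons q t ih =>
    intro out lo hi
    simp only [List.foldl_cons, pvStepB, pvMerge]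
    by_cases h : q.1 ≤ hi
    · simp [h, ih]
    · simp [h, ih, List.append_assoc]

theorem pvMerge_lb (t : List (Int × Int)) : ∀ (lo hi x : Int),
    t.Pairwise (fun a b => a.1 ≤ b.1) → (∀ p ∈ t, lo ≤ p.1) →
    x ∈ pvMerge lo hi t → lo ≤ x := by
  induction t with
  | nil =>
    intro lo hi x _ _ hx
    exact ((PySem.List.mem_pyRange_one).1 hx).1
  | cons q t ih =>
    intro lo hi x hp hge hx
    simp only [pvMerge] at hx
    rcases List.pairwise_cons.1 hp with ⟨hq, hp'⟩
    by_cases h : q.1 ≤ hi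
    · rw [if_pos h] at hx
      exact ih lo (max hi q.2) x hp' (fun p hpt => hge p (List.mem_cons_of_mem _ hpt)) hx
    · rw [if_neg h] at hx
      rcases List.mem_append.1 hx with hx1 | hx2
      · exact ((PySem.List.mem_pyRange_one).1 hx1).1
      · have h1 : q.1 ≤ x := ih q.1 q.2 x hp' hq hx2
        have h2 : lo ≤ q.1 := hge q (List.mem_cons_self ..)
        omega

theorem pvMerge_pairwise (t : List (Int × Int)) : ∀ (lo hi : Int),
    t.Pairwise (fun a b => a.1 ≤ b.1) → (pvMerge lo hi t).Pairwise (· < ·) := by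
  induction t with
  | nil => intro lo hi _; exact PySem.List.pairwise_lt_pyRange_one lo hi
  | cons q t ih =>
    intro lo hi hp
    rcases List.pairwise_cons.1 hp with ⟨hq, hp'⟩
    simp only [pvMerge]
    by_cases h : q.1 ≤ hi
    · rw [if_pos h]; exact ih lo (max hi q.2) hp'
    · rw [if_neg h]
      refine List.pairwise_append.2 ⟨PySem.List.pairwise_lt_pyRange_one lo hi, ih q.1 q.2 hp', ?_⟩
      intro x hx y hy
      have hxhi : x < hi := ((PySem.List.mem_pyRange_one).1 hx).2
      have hylb : q.1 ≤ y := pvMerge_lb t q.1 q.2 y hp' hq hy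
      omega

theorem pvMerge_mem (t : List (Int × Int)) : ∀ (lo hi x : Int),
    t.Pairwise (fun a b => a.1 ≤ b.1) → (∀ p ∈ t, lo ≤ p.1) → (∀ p ∈ t, p.1 < p.2) →
    (x ∈ pvMerge lo hi t ↔ (lo ≤ x ∧ x < hi) ∨ ∃ p ∈ t, p.1 ≤ x ∧ x < p.2) := by
  induction t with
  | nil =>
    intro lo hi x _ _ _
    simp [pvMerge, PySem.List.mem_pyRange_one]
  | cons q t ih =>
    intro lo hi x hp hge hlh
    rcases List.pairwise_cons.1 hp with ⟨hq, hp'⟩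
    have hloq : lo ≤ q.1 := hge q (List.mem_cons_self ..)
    have hqlt : q.1 < q.2 := hlh q (List.mem_cons_self ..)
    simp only [pvMerge]
    by_cases h : q.1 ≤ hi
    · rw [if_pos h]
      rw [ih lo (max hi q.2) x hp' (fun p hpt => hge p (List.mem_cons_of_mem _ hpt))
            (fun p hpt => hlh p (List.mem_cons_of_mem _ hpt))]
      constructor
      · rintro (⟨h1, h2⟩ | ⟨p, hpt, hpx⟩)
        · by_cases hxh : x < hi
          · exact Or.inl ⟨h1, hxh⟩
          · exact Or.inr ⟨q, List.mem_cons_self .., by omega⟩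
        · exact Or.inr ⟨p, List.mem_cons_of_mem _ hpt, hpx⟩
      · rintro (⟨h1, h2⟩ | ⟨p, hpt, hpx⟩)
        · exact Or.inl ⟨h1, by omega⟩
        · rcases List.mem_cons.1 hpt with rfl | hpt'
          · exact Or.inl ⟨by omega, by omega⟩
          · exact Or.inr ⟨p, hpt', hpx⟩
    · rw [if_neg h]
      rw [List.mem_append, PySem.List.mem_pyRange_one,
          ih q.1 q.2 x hp' hq (fun p hpt => hlh p (List.mem_cons_of_mem _ hpt))]
      constructor
      · rintro (h1 | (h2 | ⟨p, hpt, hpx⟩))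
        · exact Or.inl h1
        · exact Or.inr ⟨q, List.mem_cons_self .., h2⟩
        · exact Or.inr ⟨p, List.mem_cons_of_mem _ hpt, hpx⟩
      · rintro (h1 | ⟨p, hpt, hpx⟩)
        · exact Or.inl h1
        · rcases List.mem_cons.1 hpt with rfl | hpt'
          · exact Or.inr (Or.inl hpx)
          · exact Or.inr (Or.inr ⟨p, hpt', hpx⟩)

-- membership in A's raw index list ↔ covered by one of B's collected intervals
theorem pv_base_mem (l : List (String × Int × Int)) (cl : Int) (x : Int) :
    (x ∈ l.foldl (fun acc p =>
        let lo := max 0 p.2.1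
        let hi := min cl p.2.2
        if hi > lo then acc ++ PySem.List.pyRange lo hi 1 else acc) []) ↔
    (∃ q ∈ l.foldl (fun acc p =>
        let lo := max 0 p.2.1
        let hi := min cl p.2.2
        if hi > lo then acc ++ [(lo, hi)] else acc) ([] : List (Int × Int)),
      q.1 ≤ x ∧ x < q.2) := by
  have hA : l.foldl (fun acc p =>
        let lo := max 0 p.2.1
        let hi := min cl p.2.2
        if hi > lo then acc ++ PySem.List.pyRange lo hi 1 else acc) [] =
      [] ++ l.flatMap (fun p =>
        if min cl p.2.2 > max 0 p.2.1 then PySem.List.pyRange (max 0 p.2.1) (min cl p.2.2) 1 else []) := by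
    rw [← PySem.List.foldl_append_eq_flatMap]
    apply PySem.List.foldl_congr_mem
    intro acc p _
    by_cases h : min cl p.2.2 > max 0 p.2.1 <;> simp [h]
  have hB : l.foldl (fun acc p =>
        let lo := max 0 p.2.1
        let hi := min cl p.2.2
        if hi > lo then acc ++ [(lo, hi)] else acc) ([] : List (Int × Int)) =
      [] ++ l.flatMap (fun p =>
        if min cl p.2.2 > max 0 p.2.1 then [(max 0 p.2.1, min cl p.2.2)] else []) := by
    rw [← PySem.List.foldl_append_eq_flatMap]
    apply PySem.List.foldl_congr_mem
    intro acc p _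
    by_cases h : min cl p.2.2 > max 0 p.2.1 <;> simp [h]
  rw [hA, hB]
  simp only [List.nil_append, List.mem_flatMap]
  constructor
  · rintro ⟨p, hpl, hx⟩
    by_cases h : min cl p.2.2 > max 0 p.2.1
    · rw [if_pos h, PySem.List.mem_pyRange_one] at hx
      exact ⟨(max 0 p.2.1, min cl p.2.2), ⟨p, hpl, by rw [if_pos h]; exact List.mem_singleton.2 rfl⟩, hx⟩
    · rw [if_neg h] at hx; cases hx
  · rintro ⟨q, ⟨p, hpl, hq⟩, hx⟩
    by_cases h : min cl p.2.2 > max 0 p.2.1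
    · rw [if_pos h] at hq
      rcases List.mem_singleton.1 hq with rfl
      exact ⟨p, hpl, by rw [if_pos h, PySem.List.mem_pyRange_one]; exact hx⟩
    · rw [if_neg h] at hq; cases hq

-- every collected interval is non-empty
theorem pv_base_valid (l : List (String × Int × Int)) (cl : Int) :
    ∀ q ∈ l.foldl (fun acc p =>
        let lo := max 0 p.2.1
        let hi := min cl p.2.2
        if hi > lo then acc ++ [(lo, hi)] else acc) ([] : List (Int × Int)), q.1 < q.2 := by
  suffices h : ∀ (acc : List (Int × Int)), (∀ q ∈ acc, q.1 < q.2) →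
      ∀ q ∈ l.foldl (fun acc p =>
        let lo := max 0 p.2.1
        let hi := min cl p.2.2
        if hi > lo then acc ++ [(lo, hi)] else acc) acc, q.1 < q.2 by
    exact h [] (by simp)
  induction l with
  | nil => intro acc hacc; exact hacc
  | cons p l ih =>
    intro acc hacc
    simp only [List.foldl_cons]
    apply ih
    intro q hq
    by_cases h : min cl p.2.2 > max 0 p.2.1
    · rw [if_pos h] at hq
      rcases List.mem_append.1 hq with h1 | h2
      · exact hacc q h1
      · rcases List.mem_singleton.1 h2 with rfl; exact h
    · rw [if_neg h] at hq; exact hacc q hq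

theorem build_content_indices_py_spec_aux (l : List (String × Int × Int)) (pl cl : Int) :
    build_content_indices_py l pl cl = build_content_indices_py_alt l pl cl := by
  unfold build_content_indices_py build_content_indices_py_alt
  simp only []
  set base : List Int := l.foldl (fun acc p =>
      let lo := max 0 p.2.1
      let hi := min cl p.2.2
      if hi > lo then acc ++ PySem.List.pyRange lo hi 1 else acc) [] with hbase
  set ivs : List (Int × Int) := l.foldl (fun acc p =>
      let lo := max 0 p.2.1
      let hi := min cl p.2.2
      if hi > lo then acc ++ [(lo, hi)] else acc) ([] : List (Int × Int)) with hivs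
  set ind2 : List Int := if cl > pl then base ++ PySem.List.pyRange pl cl 1 else base with hind2
  set ivs2 : List (Int × Int) := if cl > pl then ivs ++ [(pl, cl)] else ivs with hivs2
  -- membership and validity transported to ivs2 / ind2
  have hmem : ∀ x : Int, x ∈ ind2 ↔ ∃ q ∈ ivs2, q.1 ≤ x ∧ x < q.2 := by
    intro x
    by_cases hcp : cl > pl
    · simp only [hind2, hivs2, if_pos hcp, List.mem_append]
      rw [pv_base_mem l cl x, PySem.List.mem_pyRange_one]
      constructor
      · rintro (⟨q, hq, hx⟩ | h2)
        · exact ⟨q, Or.inl hq, hx⟩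
        · exact ⟨(pl, cl), Or.inr (List.mem_singleton.2 rfl), h2⟩
      · rintro ⟨q, hq, hx⟩
        rcases hq with h1 | h2
        · exact Or.inl ⟨q, h1, hx⟩
        · rcases List.mem_singleton.1 h2 with rfl; exact Or.inr hx
    · simp only [hind2, hivs2, if_neg hcp]
      exact pv_base_mem l cl x
  have hvalid : ∀ q ∈ ivs2, q.1 < q.2 := by
    intro q hq
    by_cases hcp : cl > pl
    · rw [hivs2, if_pos hcp] at hq
      rcases List.mem_append.1 hq with h1 | h2
      · exact pv_base_valid l cl q h1
      · rcases List.mem_singleton.1 h2 with rfl; exact hcp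
    · rw [hivs2, if_neg hcp] at hq
      exact pv_base_valid l cl q hq
  -- the sorted interval list
  set sivs : List (Int × Int) := PySem.List.sorted ivs2 (fun p => p.1) false with hsivs
  have hsp : sivs.Pairwise (fun a b => a.1 ≤ b.1) := PySem.List.sorted_pairwise ivs2 (fun p => p.1)
  have hsmem : ∀ q, q ∈ sivs ↔ q ∈ ivs2 := fun q => PySem.List.mem_sorted ivs2 (fun p => p.1) false q
  have hsvalid : ∀ q ∈ sivs, q.1 < q.2 := fun q hq => hvalid q ((hsmem q).1 hq)
  -- characterise B's output
  have hBout : ∀ Bout : List Int,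
      Bout = pvFinB (sivs.foldl pvStepB ([], none)) →
      Bout.Pairwise (· < ·) ∧ (∀ x, x ∈ Bout ↔ ∃ q ∈ ivs2, q.1 ≤ x ∧ x < q.2) := by
    intro Bout hB
    match hs : sivs with
    | [] =>
      rw [hs] at hB
      constructor
      · rw [hB]; exact List.Pairwise.nil
      · intro x
        rw [hB]
        simp only [List.foldl_nil, pvFinB, List.not_mem_nil, false_iff]
        rintro ⟨q, hq, _⟩
        have := (hsmem q).2 hq
        rw [hs] at this
        cases this
    | q :: t =>
      rw [hs] at hB hsp hsvalid hsmem
      rcases List.pairwise_cons.1 hsp with ⟨hq, hp'⟩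
      have hstep : (List.foldl pvStepB ([], none) (q :: t)) = t.foldl pvStepB ([], some q) := by
        simp [pvStepB]
      rw [hstep, pvFinB_foldl t [] q.1 q.2, List.nil_append] at hB
      constructor
      · rw [hB]; exact pvMerge_pairwise t q.1 q.2 hp'
      · intro x
        rw [hB, pvMerge_mem t q.1 q.2 x hp' hq (fun p hpt => hsvalid p (List.mem_cons_of_mem _ hpt))]
        constructor
        · rintro (h1 | ⟨p, hpt, hpx⟩)
          · exact ⟨q, (hsmem q).1 (List.mem_cons_self ..), h1⟩
          · exact ⟨p, (hsmem p).1 (List.mem_cons_of_mem _ hpt), hpx⟩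
        · rintro ⟨p, hpiv, hpx⟩
          rcases List.mem_cons.1 ((hsmem p).2 hpiv) with rfl | hpt
          · exact Or.inl hpx
          · exact Or.inr ⟨p, hpt, hpx⟩
  rcases hBout _ rfl with ⟨hBpw, hBmem⟩
  -- A's output is sorted(set(ind2)); B's output is a strictly increasing list with the same members
  apply PySem.List.sorted_eq_of_perm_of_pairwise_lt
  · rw [List.perm_ext_iff_of_nodup (hBpw.imp (fun h => ne_of_lt h)) (PySem.Set.nodup_ofList ind2)]
    intro a
    rw [hBmem a, PySem.Set.mem_ofList, hmem a]
  · exact hBpw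

-- ===== VERDICT (by name: the statement is the Claim_ definition above) =====
theorem build_content_indices_py_spec : Claim_equal_build_content_indices_py := by
  intro l pl cl _
  unfold Spec_build_content_indices_py
  exact build_content_indices_py_spec_aux l pl cl
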